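-- pv_equiv track=rewrite | github.com/GitMonsters/octotetrahedral-agi | arc-puzzle-catalog/re-arc/solves/21cd18fb/solver.py | _find_shifts
-- ===== SOURCE A (Python) =====
-- def _find_shifts(dots: list[tuple[int, int]], H: int, W: int) -> list[tuple[int, int]]:
--     """Find all (dr,dc) that place every dot on the H×W rectangle perimeter."""
--     dr_cands = set()
--     dc_cands = set()
--     for r, c in dots:
--         dr_cands.add(r)
--         dr_cands.add(r - H + 1)
--         dc_cands.add(c)
--         dc_cands.add(c - W + 1)
--
--     results = []
--     for dr in dr_cands:
--         for dc in dc_cands: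
--             if all(_on_perim(r - dr, c - dc, H, W) for r, c in dots):
--                 results.append((dr, dc))
--     return results
--
-- def _on_perim(or_: int, oc: int, H: int, W: int) -> bool:
--     """Check if (or_, oc) is on the perimeter of an H×W rectangle."""
--     return (0 <= or_ <= H - 1 and 0 <= oc <= W - 1 and
--             (or_ in (0, H - 1) or oc in (0, W - 1)))
-- ===== SOURCE B (Python) =====
-- def _find_shifts(dots: list[tuple[int, int]], H: int, W: int) -> list[tuple[int, int]]:
--     """Find all (dr,dc) that place every dot on the H x W rectangle perimeter.
--
--     For each dr candidate, one O(len(dots)) pass derives the full constraint on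
--     dc (an interval intersected with at most two forced values), so the per-dot
--     perimeter test is not re-run for every (dr, dc) pair.
--     """
--     dr_cands = {v for r, _ in dots for v in (r, r - H + 1)}
--     dc_cands = {v for _, c in dots for v in (c, c - W + 1)}
--     results = []
--     for dr in dr_cands:
--         con = _dc_constraint(dots, dr, H, W)
--         if con is not None:
--             lo, hi, must = con
--             results.extend((dr, dc) for dc in dc_cands
--                            if (lo is None or lo <= dc <= hi)
--                            and (must is None or dc in must))
--     return results
--
--
-- def _dc_constraint(dots, dr, H, W):
--     """Constraint on dc for this dr: None if impossible, else (lo, hi, must).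
--
--     Every dot must land in rows [0, H-1]; every dot bounds dc to
--     [c - W + 1, c]; a dot landing on a strictly interior row must sit on a
--     vertical edge, forcing dc into {c, c - W + 1}.
--     """
--     lo = hi = None
--     must = None
--     for r, c in dots:
--         rr = r - dr
--         if rr < 0 or rr > H - 1:
--             return None
--         lo = c - W + 1 if lo is None else max(lo, c - W + 1)
--         hi = c if hi is None else min(hi, c)
--         if 0 < rr < H - 1:
--             forced = {c, c - W + 1}
--             must = forced if must is None else must & forced
--             if not must:
--                 return None
--     if lo is not None and lo > hi:
--         return None
--     return lo, hi, must
-- ===== Notes on version B (the rewrite author's own statement) =====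
-- stated objective: faster
-- what changed: Instead of re-running the all-dots perimeter test for every (dr, dc) candidate pair, B makes one O(n) pass per dr candidate that derives the complete constraint on dc (an interval from the column bounds intersected with at most two forced values from interior-row dots) and then emits exactly the dc candidates satisfying it.
import Mathlib
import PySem

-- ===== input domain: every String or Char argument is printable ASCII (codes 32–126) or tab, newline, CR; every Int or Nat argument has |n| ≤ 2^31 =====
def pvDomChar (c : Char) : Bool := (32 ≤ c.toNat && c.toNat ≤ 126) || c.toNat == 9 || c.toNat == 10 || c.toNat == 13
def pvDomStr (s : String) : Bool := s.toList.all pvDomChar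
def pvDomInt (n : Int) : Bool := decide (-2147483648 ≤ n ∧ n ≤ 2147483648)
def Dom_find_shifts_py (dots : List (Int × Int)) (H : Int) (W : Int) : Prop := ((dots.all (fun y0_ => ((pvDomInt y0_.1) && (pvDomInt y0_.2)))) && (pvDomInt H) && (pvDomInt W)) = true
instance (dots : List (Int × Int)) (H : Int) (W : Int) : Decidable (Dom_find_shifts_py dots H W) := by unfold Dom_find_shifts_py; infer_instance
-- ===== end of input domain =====

-- B replaces A's per-(dr,dc) all-dots perimeter test by one per-dr pass that derives the
-- whole valid-dc constraint (an interval plus at most two forced values): O(n^2) vs A's O(n^3).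

-- ===== PORT A =====
def on_perim_py (or_ : Int) (oc : Int) (H : Int) (W : Int) : Bool :=
  decide (0 ≤ or_ ∧ or_ ≤ H - 1) && decide (0 ≤ oc ∧ oc ≤ W - 1) &&
    ((or_ == 0 || or_ == H - 1) || (oc == 0 || oc == W - 1))

-- A builds the two candidate sets in one loop over dots (four .add calls per dot),
-- then tests every (dr, dc) pair with the all-dots perimeter check.
def find_shifts_py (dots : List (Int × Int)) (H : Int) (W : Int) : List (Int × Int) :=
  let cands := dots.foldl
    (fun (st : PySem.Set Int × PySem.Set Int) rc =>
      ((PySem.Set.add (PySem.Set.add st.1 rc.1) (rc.1 - H + 1)),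
       (PySem.Set.add (PySem.Set.add st.2 rc.2) (rc.2 - W + 1))))
    (PySem.Set.empty, PySem.Set.empty)
  cands.1.foldl (fun results dr =>
    cands.2.foldl (fun results dc =>
      if dots.all (fun rc => on_perim_py (rc.1 - dr) (rc.2 - dc) H W)
      then results ++ [(dr, dc)] else results) results) []

-- ===== PORT B =====
-- B's per-dr loop over the dots (the two Python `return None`s become `none`):
-- state = (bounds : running interval [lo, hi] for dc, must : forced-dc set from interior rows)
def dcLoop (dr : Int) (H : Int) (W : Int) :
    List (Int × Int) → Option (Int × Int) → Option (PySem.Set Int) →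
    Option (Option (Int × Int) × Option (PySem.Set Int))
  | [], bounds, must => some (bounds, must)
  | (r, c) :: rest, bounds, must =>
    let rr := r - dr
    if rr < 0 ∨ rr > H - 1 then none
    else
      let bounds' := match bounds with
        | none => (c - W + 1, c)
        | some (lo, hi) => (max lo (c - W + 1), min hi c)
      if 0 < rr ∧ rr < H - 1 then
        let forced : PySem.Set Int := PySem.Set.ofList [c, c - W + 1]
        let must' := match must with | none => forced | some m => PySem.Set.inter m forced
        if must' = [] then none else dcLoop dr H W rest (some bounds') (some must')
      else dcLoop dr H W rest (some bounds') must

-- _dc_constraint: the loop, then the final `lo > hi` emptiness check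
def dc_constraint (dots : List (Int × Int)) (dr : Int) (H : Int) (W : Int) :
    Option (Option (Int × Int) × Option (PySem.Set Int)) :=
  match dcLoop dr H W dots none none with
  | none => none
  | some (bounds, must) =>
    match bounds with
    | none => some (none, must)
    | some (lo, hi) => if lo > hi then none else some (some (lo, hi), must)

-- the emission condition on a dc candidate
def bCond (bounds : Option (Int × Int)) (must : Option (PySem.Set Int)) (dc : Int) : Bool :=
  (match bounds with | none => true | some (lo, hi) => decide (lo ≤ dc ∧ dc ≤ hi)) &&
  (match must with | none => true | some m => m.contains dc)

def find_shifts_py_alt (dots : List (Int × Int)) (H : Int) (W : Int) : List (Int × Int) :=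
  let dr_cands : PySem.Set Int := PySem.Set.ofList (dots.flatMap (fun rc => [rc.1, rc.1 - H + 1]))
  let dc_cands : PySem.Set Int := PySem.Set.ofList (dots.flatMap (fun rc => [rc.2, rc.2 - W + 1]))
  dr_cands.foldl (fun results dr =>
    match dc_constraint dots dr H W with
    | none => results
    | some (bounds, must) =>
      results ++ (dc_cands.filter (fun dc => bCond bounds must dc)).map (fun dc => (dr, dc))) []

-- ===== PRECONDITION & SPEC =====
def Spec_find_shifts_py (dots : List (Int × Int)) (H : Int) (W : Int) (out : List (Int × Int)) : Prop := out = find_shifts_py_alt dots H W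
instance (dots : List (Int × Int)) (H : Int) (W : Int) (out : List (Int × Int)) : Decidable (Spec_find_shifts_py dots H W out) := by unfold Spec_find_shifts_py; infer_instance

-- ===== CLAIM (what is proved, stated in full; the proofs are below) =====
def Claim_equal_find_shifts_py : Prop := ∀ (dots : List (Int × Int)) (H : Int) (W : Int), Dom_find_shifts_py dots H W → Spec_find_shifts_py dots H W (find_shifts_py dots H W)

-- ===== LEMMAS AND PROOFS =====

-- A's one-loop pair of candidate sets = B's two set-comprehension candidate sets
theorem pair_fold_cands (H W : Int) (dots : List (Int × Int)) :
    ∀ (s t : PySem.Set Int),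
    dots.foldl
      (fun (st : PySem.Set Int × PySem.Set Int) rc =>
        ((PySem.Set.add (PySem.Set.add st.1 rc.1) (rc.1 - H + 1)),
         (PySem.Set.add (PySem.Set.add st.2 rc.2) (rc.2 - W + 1)))) (s, t)
    = (PySem.Set.update s (dots.flatMap (fun rc => [rc.1, rc.1 - H + 1])),
       PySem.Set.update t (dots.flatMap (fun rc => [rc.2, rc.2 - W + 1]))) := by
  induction dots with
  | nil => intro s t; simp [PySem.Set.update]
  | cons rc rest ih =>
    intro s t
    simp only [List.foldl_cons, List.flatMap_cons, ih]
    simp [PySem.Set.update]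

theorem set_two_ne_nil (c d : Int) : ¬ (PySem.Set.ofList [c, d] = []) := by
  intro h
  have : c ∈ PySem.Set.ofList [c, d] := by rw [PySem.Set.mem_ofList]; simp
  rw [h] at this; simp at this

theorem dcLoop_sound (dr H W dc : Int) (dots : List (Int × Int)) :
    ∀ (bounds : Option (Int × Int)) (must : Option (PySem.Set Int)),
    (match dcLoop dr H W dots bounds must with
     | none => False
     | some (b', m') => bCond b' m' dc = true)
    ↔ (bCond bounds must dc = true ∧
       dots.all (fun rc => on_perim_py (rc.1 - dr) (rc.2 - dc) H W) = true) := by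
  induction dots with
  | nil => intro bounds must; simp [dcLoop]
  | cons rc rest ih =>
    intro bounds must
    obtain ⟨r, c⟩ := rc
    have hmem : ∀ m : PySem.Set Int, m.contains dc = true ↔ dc ∈ m :=
      fun m => List.contains_iff_mem
    by_cases hrow : r - dr < 0 ∨ r - dr > H - 1
    · simp only [dcLoop, if_pos hrow]
      constructor
      · exact fun h => h.elim
      · rintro ⟨-, hall⟩
        simp only [List.all_cons, Bool.and_eq_true] at hall
        have := hall.1
        simp only [on_perim_py, Bool.and_eq_true, decide_eq_true_eq] at this
        omega
    · by_cases hint : 0 < r - dr ∧ r - dr < H - 1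
      · -- interior row
        have hperim : (on_perim_py (r - dr) (c - dc) H W = true) ↔
            ((c - W + 1 ≤ dc ∧ dc ≤ c) ∧ (dc = c ∨ dc = c - W + 1)) := by
          simp only [on_perim_py, Bool.and_eq_true, Bool.or_eq_true, decide_eq_true_eq, beq_iff_eq]
          omega
        simp only [dcLoop, if_neg hrow, if_pos hint]
        cases must with
        | none =>
          rw [if_neg (set_two_ne_nil c (c - W + 1)), ih]
          cases bounds with
          | none =>
            simp only [bCond, List.all_cons, Bool.and_eq_true, decide_eq_true_eq, hperim,
              hmem, PySem.Set.mem_ofList, List.mem_cons, List.not_mem_nil, or_false]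
            tauto
          | some lh =>
            obtain ⟨lo, hi⟩ := lh
            simp only [bCond, List.all_cons, Bool.and_eq_true, decide_eq_true_eq, hperim,
              hmem, PySem.Set.mem_ofList, List.mem_cons, List.not_mem_nil, or_false,
              max_le_iff, le_min_iff]
            tauto
        | some m =>
          by_cases hmt : PySem.Set.inter m (PySem.Set.ofList [c, c - W + 1]) = []
          · rw [if_pos hmt]
            simp only [false_iff]
            rintro ⟨hb, hall⟩
            simp only [bCond, Bool.and_eq_true, hmem] at hb
            simp only [List.all_cons, Bool.and_eq_true, hperim] at hall
            have hdc : dc ∈ PySem.Set.inter m (PySem.Set.ofList [c, c - W + 1]) := by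
              rw [PySem.Set.mem_inter, PySem.Set.mem_ofList]
              exact ⟨hb.2, by simp only [List.mem_cons, List.not_mem_nil, or_false]; tauto⟩
            rw [hmt] at hdc; simp at hdc
          · rw [if_neg hmt, ih]
            cases bounds with
            | none =>
              simp only [bCond, List.all_cons, Bool.and_eq_true, decide_eq_true_eq, hperim,
                hmem, PySem.Set.mem_inter, PySem.Set.mem_ofList, List.mem_cons,
                List.not_mem_nil, or_false]
              tauto
            | some lh =>
              obtain ⟨lo, hi⟩ := lh
              simp only [bCond, List.all_cons, Bool.and_eq_true, decide_eq_true_eq, hperim,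
                hmem, PySem.Set.mem_inter, PySem.Set.mem_ofList, List.mem_cons,
                List.not_mem_nil, or_false, max_le_iff, le_min_iff]
              tauto
      · -- edge row
        have hperim : (on_perim_py (r - dr) (c - dc) H W = true) ↔ (c - W + 1 ≤ dc ∧ dc ≤ c) := by
          simp only [on_perim_py, Bool.and_eq_true, Bool.or_eq_true, decide_eq_true_eq, beq_iff_eq]
          omega
        simp only [dcLoop, if_neg hrow, if_neg hint]
        rw [ih]
        cases bounds with
        | none =>
          simp only [bCond, List.all_cons, Bool.and_eq_true, decide_eq_true_eq, hperim]
          tauto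
        | some lh =>
          obtain ⟨lo, hi⟩ := lh
          simp only [bCond, List.all_cons, Bool.and_eq_true, decide_eq_true_eq, hperim,
            max_le_iff, le_min_iff]
          tauto

theorem all_eq_bCond (dr H W : Int) (dots : List (Int × Int))
    (bounds : Option (Int × Int)) (must : Option (PySem.Set Int))
    (hbi : dcLoop dr H W dots none none = some (bounds, must)) (dc : Int) :
    (dots.all (fun rc => on_perim_py (rc.1 - dr) (rc.2 - dc) H W)) = bCond bounds must dc := by
  have h := dcLoop_sound dr H W dc dots none none
  rw [hbi] at h
  have htriv : bCond none none dc = true := rfl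
  simp only [htriv, true_and] at h
  cases hb : dots.all (fun rc => on_perim_py (rc.1 - dr) (rc.2 - dc) H W) <;>
    cases hc : bCond bounds must dc <;> simp_all

theorem all_false_of_dcLoop_none (dr H W : Int) (dots : List (Int × Int))
    (hbi : dcLoop dr H W dots none none = none) (dc : Int) :
    (dots.all (fun rc => on_perim_py (rc.1 - dr) (rc.2 - dc) H W)) = false := by
  have h := dcLoop_sound dr H W dc dots none none
  rw [hbi] at h
  simp only [false_iff, not_and] at h
  simpa using h rfl

theorem find_shifts_py_eq (dots : List (Int × Int)) (H W : Int) :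
    find_shifts_py dots H W = find_shifts_py_alt dots H W := by
  simp only [find_shifts_py, find_shifts_py_alt]
  rw [pair_fold_cands]
  have hof : ∀ xs : List Int, PySem.Set.update PySem.Set.empty xs = PySem.Set.ofList xs := by
    intro xs; simp [PySem.Set.update, PySem.Set.ofList_eq_foldl, PySem.Set.empty]
  rw [hof, hof]
  apply PySem.List.foldl_congr_mem
  intro acc dr _
  rw [PySem.List.foldl_append_if]
  cases hbi : dcLoop dr H W dots none none with
  | none =>
    have hfil : (PySem.Set.ofList (dots.flatMap (fun rc => [rc.2, rc.2 - W + 1]))).filter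
        (fun dc => dots.all (fun rc => on_perim_py (rc.1 - dr) (rc.2 - dc) H W)) = [] := by
      rw [List.filter_eq_nil_iff]
      intro dc _
      simp [all_false_of_dcLoop_none dr H W dots hbi dc]
    simp only [dc_constraint, hbi, hfil]
    simp
  | some bm =>
    obtain ⟨bounds, must⟩ := bm
    have hall := all_eq_bCond dr H W dots bounds must hbi
    cases bounds with
    | none =>
      simp only [dc_constraint, hbi]
      congr 1
      congr 1
      exact List.filter_congr (fun dc _ => hall dc)
    | some lh =>
      obtain ⟨lo, hi⟩ := lh
      by_cases hlh : lo > hi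
      · have hfil : (PySem.Set.ofList (dots.flatMap (fun rc => [rc.2, rc.2 - W + 1]))).filter
            (fun dc => dots.all (fun rc => on_perim_py (rc.1 - dr) (rc.2 - dc) H W)) = [] := by
          rw [List.filter_eq_nil_iff]
          intro dc _
          rw [hall dc]
          intro hcc
          simp only [bCond, Bool.and_eq_true, decide_eq_true_eq] at hcc
          obtain ⟨⟨h1, h2⟩, -⟩ := hcc
          omega
        simp only [dc_constraint, hbi, if_pos hlh, hfil]
        simp
      · simp only [dc_constraint, hbi, if_neg hlh]
        congr 1
        congr 1
        exact List.filter_congr (fun dc _ => hall dc)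

-- ===== VERDICT (by name: the statement is the Claim_ definition above) =====
theorem find_shifts_py_spec : Claim_equal_find_shifts_py := by
  intro dots H W _
  exact find_shifts_py_eq dots H W
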